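-- pv_equiv track=rewrite | github.com/zwcolin/Attribution-Improvement-by-User-Path-Behavior-Clustering | utils.py | generate_distribution_from_freq_dics
-- ===== SOURCE A (Python) =====
-- def generate_distribution_from_freq_dics(freq_dics):
-- 	lst_result = []
-- 	for i in range(len(freq_dics)):
-- 		lst_result.append([])
-- 	seq_key = []
-- 	freq_dic = freq_dics[0]
-- 	for seq in freq_dic:
-- 		exist_all = True
-- 		for freq_dic in freq_dics:
-- 			if seq not in freq_dic:
-- 				exist_all = False
-- 		if exist_all:
-- 			seq_key.append(seq)
-- 			for i in range(len(freq_dics)):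
-- 				lst_result[i].append(freq_dics[i][seq])
-- 	return lst_result, seq_key
-- ===== SOURCE B (Python) =====
-- def generate_distribution_from_freq_dics(freq_dics):
--     n = len(freq_dics)
--     count = {}
--     for d in freq_dics:
--         for k in d:
--             count[k] = count.get(k, 0) + 1
--     seq_key = [k for k in freq_dics[0] if count[k] == n]
--     lst_result = [[d[k] for k in seq_key] for d in freq_dics]
--     return lst_result, seq_key
-- ===== Notes on version B (the rewrite author's own statement) =====
-- stated objective: alternative
-- what changed: Replaces A's per-key nested membership scan over all dicts by a single counting pass that builds one occurrence counter over all keys; a key of the first dict is common exactly when its count equals the number of dicts, so no membership test remains.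
import Mathlib
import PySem

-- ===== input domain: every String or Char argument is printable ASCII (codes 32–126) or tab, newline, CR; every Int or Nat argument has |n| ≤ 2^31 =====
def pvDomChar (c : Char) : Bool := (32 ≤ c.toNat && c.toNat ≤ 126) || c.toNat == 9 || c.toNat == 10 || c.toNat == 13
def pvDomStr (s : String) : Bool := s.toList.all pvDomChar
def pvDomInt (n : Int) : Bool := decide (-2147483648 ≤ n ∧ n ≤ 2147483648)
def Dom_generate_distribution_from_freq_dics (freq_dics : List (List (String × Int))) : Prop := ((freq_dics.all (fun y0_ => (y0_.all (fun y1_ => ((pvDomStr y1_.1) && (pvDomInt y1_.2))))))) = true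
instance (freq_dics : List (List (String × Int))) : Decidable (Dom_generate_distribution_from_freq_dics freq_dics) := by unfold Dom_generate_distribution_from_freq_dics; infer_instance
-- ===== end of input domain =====

-- B replaces A's nested per-key membership scan by one counting pass over all keys:
-- a key of the first dict is common exactly when its occurrence count equals the
-- number of dicts (alternative decomposition, same overall cost class).

-- dict primitives on an association list: membership and first-match lookup
def pvContains (d : List (String × Int)) (k : String) : Bool := d.any (fun p => p.1 == k)
def pvLookup (d : List (String × Int)) (k : String) : Int :=
  ((d.find? (fun p => p.1 == k)).map (·.2)).getD 0

-- ===== PORT A =====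
-- the body of A's main loop, as a helper
def pvStepA (freq_dics : List (List (String × Int))) (st : List (List Int) × List String)
    (p : String × Int) : List (List Int) × List String :=
  let exist_all := freq_dics.foldl (fun b d => if pvContains d p.1 then b else false) true
  if exist_all then
    (List.zipWith (fun l d => l ++ [pvLookup d p.1]) st.1 freq_dics, st.2 ++ [p.1])
  else st

def generate_distribution_from_freq_dics (freq_dics : List (List (String × Int))) : List (List Int) × List String :=
  let lst_result : List (List Int) := freq_dics.map (fun _ => ([] : List Int))
  let freq_dic := freq_dics.headD []
  freq_dic.foldl (pvStepA freq_dics) (lst_result, [])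

-- ===== PORT B =====
-- the counting pass: count[k] = count.get(k, 0) + 1 over every key of every dict
def pvCount (freq_dics : List (List (String × Int))) : PySem.Dict String Int :=
  freq_dics.foldl
    (fun c d => d.foldl (fun c p => c.insert p.1 (c.getD p.1 0 + 1)) c)
    PySem.Dict.empty

def generate_distribution_from_freq_dics_alt (freq_dics : List (List (String × Int))) : List (List Int) × List String :=
  let n : Int := freq_dics.length
  let count := pvCount freq_dics
  let seq_key := ((freq_dics.headD []).map (·.1)).filter (fun k => count.getD k 0 == n)
  let lst_result := freq_dics.map (fun d => seq_key.map (fun k => pvLookup d k))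
  (lst_result, seq_key)

-- ===== PRECONDITION & SPEC =====
-- Pre_ excludes the empty list, on which A raises IndexError at freq_dics[0], and
-- association lists with a duplicated key inside one dict, which do not represent a
-- Python dict (Python dicts have unique keys, so A never receives such an input).
def Pre_generate_distribution_from_freq_dics (freq_dics : List (List (String × Int))) : Prop :=
  freq_dics ≠ [] ∧ ∀ d ∈ freq_dics, (d.map Prod.fst).Nodup
instance (freq_dics : List (List (String × Int))) : Decidable (Pre_generate_distribution_from_freq_dics freq_dics) := by unfold Pre_generate_distribution_from_freq_dics; infer_instance
def pvWitness_generate_distribution_from_freq_dics : (List (List (String × Int))) := [[("a", 1)], [("a", 2), ("b", 3)]]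
def Spec_generate_distribution_from_freq_dics (freq_dics : List (List (String × Int))) (out : List (List Int) × List String) : Prop := out = generate_distribution_from_freq_dics_alt freq_dics
instance (freq_dics : List (List (String × Int))) (out : List (List Int) × List String) : Decidable (Spec_generate_distribution_from_freq_dics freq_dics out) := by unfold Spec_generate_distribution_from_freq_dics; infer_instance

-- ===== CLAIM (what is proved, stated in full; the proofs are below) =====
def Claim_equal_generate_distribution_from_freq_dics : Prop := ∀ (freq_dics : List (List (String × Int))), Dom_generate_distribution_from_freq_dics freq_dics → Pre_generate_distribution_from_freq_dics freq_dics → Spec_generate_distribution_from_freq_dics freq_dics (generate_distribution_from_freq_dics freq_dics)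

-- ===== LEMMAS AND PROOFS =====

theorem pvContains_iff (d : List (String × Int)) (k : String) :
    pvContains d k = true ↔ k ∈ d.map (·.1) := by
  simp only [pvContains, List.any_eq_true, List.mem_map, beq_iff_eq]

-- A's inner flag loop is the conjunction over all dicts
theorem pv_foldl_and (fds : List (List (String × Int))) (k : String) (b : Bool) :
    fds.foldl (fun b d => if pvContains d k then b else false) b = (b && fds.all (fun d => pvContains d k)) := by
  induction fds generalizing b with
  | nil => simp
  | cons d rest ih =>
    simp only [List.foldl_cons, List.all_cons, ih]
    by_cases h : pvContains d k <;> simp [h]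

theorem pvStepA_eq (fds : List (List (String × Int))) (st : List (List Int) × List String)
    (p : String × Int) :
    pvStepA fds st p =
      if fds.all (fun d => pvContains d p.1) then
        (List.zipWith (fun l d => l ++ [pvLookup d p.1]) st.1 fds, st.2 ++ [p.1])
      else st := by
  unfold pvStepA
  rw [pv_foldl_and, Bool.true_and]

-- zipWith of a do-nothing step is the identity on equal lengths
theorem pv_zipWith_id {α β : Type} (as : List (List α)) (bs : List β)
    (h : as.length = bs.length) :
    List.zipWith (fun l (_ : β) => l) as bs = as := by
  induction as generalizing bs with
  | nil => simp
  | cons a as ih =>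
    cases bs with
    | nil => simp at h
    | cons b bs =>
      simp only [List.zipWith_cons_cons]
      rw [ih bs (by simpa using h)]

-- two successive append steps fuse
theorem pv_zipWith_fuse {α β : Type} (as : List (List α)) (bs : List β)
    (h : β → α) (g : β → List α) :
    List.zipWith (fun l d => l ++ g d) (List.zipWith (fun l d => l ++ [h d]) as bs) bs
      = List.zipWith (fun l d => l ++ (h d :: g d)) as bs := by
  induction as generalizing bs with
  | nil => simp
  | cons a as ih =>
    cases bs with
    | nil => simp
    | cons b bs => simp [List.zipWith_cons_cons, ih]

-- zipWith from an all-empty seed is a map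
theorem pv_zipWith_map {β : Type} (bs : List β) (g : β → List Int) :
    List.zipWith (fun l d => l ++ g d) (bs.map (fun _ => ([] : List Int))) bs = bs.map g := by
  induction bs with
  | nil => simp
  | cons b bs ih =>
    simp only [List.map_cons, List.zipWith_cons_cons, List.nil_append, ih]

-- the kept keys of A's main loop
def pvKeysF (fds : List (List (String × Int))) (xs : List (String × Int)) : List String :=
  (xs.map (·.1)).filter (fun k => fds.all (fun d => pvContains d k))

-- invariant of A's main fold
theorem pv_main_fold (fds : List (List (String × Int))) (xs : List (String × Int))
    (acc1 : List (List Int)) (acc2 : List String) (hlen : acc1.length = fds.length) :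
    xs.foldl (pvStepA fds) (acc1, acc2)
      = (List.zipWith (fun l d => l ++ (pvKeysF fds xs).map (fun k => pvLookup d k)) acc1 fds,
         acc2 ++ pvKeysF fds xs) := by
  induction xs generalizing acc1 acc2 with
  | nil =>
    simp only [List.foldl_nil, pvKeysF, List.map_nil, List.filter_nil, List.append_nil]
    rw [pv_zipWith_id _ _ hlen]
  | cons p rest ih =>
    rw [List.foldl_cons, pvStepA_eq]
    by_cases h : fds.all (fun d => pvContains d p.1)
    · rw [if_pos h, ih _ _ (by simp [hlen])]
      have hk : pvKeysF fds (p :: rest) = p.1 :: pvKeysF fds rest := by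
        simp [pvKeysF, h]
      rw [hk, pv_zipWith_fuse]
      simp
    · rw [if_neg h, ih _ _ hlen]
      have hk : pvKeysF fds (p :: rest) = pvKeysF fds rest := by
        simp [pvKeysF, h]
      rw [hk]

-- the inner counting fold adds this dict's occurrence count of k
theorem pv_inner_count (d : List (String × Int)) (c : PySem.Dict String Int) (k : String) :
    (d.foldl (fun c p => c.insert p.1 (c.getD p.1 0 + 1)) c).getD k 0
      = c.getD k 0 + ((d.map (·.1)).count k : Int) := by
  induction d generalizing c with
  | nil => simp
  | cons p rest ih =>
    rw [List.foldl_cons, ih]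
    rw [PySem.Dict.getD_insert]
    by_cases h : k = p.1
    · simp [h]; ring
    · simp [h, Ne.symm h]

-- the whole counter holds the total occurrence count of k across all dicts
theorem pv_count_eq (fds : List (List (String × Int))) (k : String) :
    (pvCount fds).getD k 0 = (fds.map (fun d => (((d.map (·.1)).count k : Nat) : Int))).sum := by
  unfold pvCount
  have h : ∀ (c : PySem.Dict String Int),
      (fds.foldl (fun c d => d.foldl (fun c p => c.insert p.1 (c.getD p.1 0 + 1)) c) c).getD k 0
        = c.getD k 0 + (fds.map (fun d => (((d.map (·.1)).count k : Nat) : Int))).sum := by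
    induction fds with
    | nil => simp
    | cons d rest ih =>
      intro c
      rw [List.foldl_cons, ih, pv_inner_count, List.map_cons, List.sum_cons]
      ring
  rw [h PySem.Dict.empty]
  simp

-- with unique keys per dict, total count = number of dicts ↔ every dict contains k
theorem pv_sum_eq_len_iff (fds : List (List (String × Int))) (k : String)
    (hnd : ∀ d ∈ fds, (d.map Prod.fst).Nodup) :
    ((fds.map (fun d => (((d.map (·.1)).count k : Nat) : Int))).sum = (fds.length : Int))
      ↔ ∀ d ∈ fds, pvContains d k = true := by
  induction fds with
  | nil => simp
  | cons d rest ih =>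
    have hd : (d.map Prod.fst).Nodup := hnd d (List.mem_cons_self)
    have hrest := ih (fun d' h => hnd d' (List.mem_cons_of_mem _ h))
    have hcnt : ((d.map (·.1)).count k : Nat) = if pvContains d k then 1 else 0 := by
      by_cases h : pvContains d k
      · simp only [h, if_true]
        exact List.count_eq_one_of_mem hd ((pvContains_iff _ _).1 h)
      · simp only [h]
        exact List.count_eq_zero.2 (fun hm => h ((pvContains_iff _ _).2 hm))
    -- each dict's count is at most 1, so the sum reaches the length iff all are 1
    have hsum_le : ∀ (l : List (List (String × Int))), (∀ d' ∈ l, (d'.map Prod.fst).Nodup) →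
        (l.map (fun d => (((d.map (·.1)).count k : Nat) : Int))).sum ≤ (l.length : Int) := by
      intro l
      induction l with
      | nil => intro _; simp
      | cons x xs ihx =>
        intro hl
        have hx : ((x.map (·.1)).count k : Nat) ≤ 1 := by
          have := hl x (List.mem_cons_self)
          rw [List.nodup_iff_count_le_one] at this
          exact this k
        have := ihx (fun d' h => hl d' (List.mem_cons_of_mem _ h))
        simp only [List.map_cons, List.sum_cons, List.length_cons]
        push_cast
        omega
    simp only [List.map_cons, List.sum_cons, List.length_cons, List.mem_cons]
    rw [hcnt]
    by_cases h : pvContains d k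
    · simp only [h, if_true]
      push_cast
      constructor
      · intro heq
        have : (rest.map (fun d => (((d.map (·.1)).count k : Nat) : Int))).sum = (rest.length : Int) := by omega
        intro d' hd'
        rcases hd' with rfl | hd'
        · exact h
        · exact (hrest.1 this) d' hd'
      · intro hall
        have : (rest.map (fun d => (((d.map (·.1)).count k : Nat) : Int))).sum = (rest.length : Int) :=
          hrest.2 (fun d' h' => hall d' (Or.inr h'))
        omega
    · simp only [h]
      have hle := hsum_le rest (fun d' h' => hnd d' (List.mem_cons_of_mem _ h'))
      constructor
      · intro heq
        exfalso
        push_cast at heq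
        omega
      · intro hall
        exact absurd (hall d (Or.inl rfl)) (by simp [h])

-- ===== VERDICT (by name: the statement is the Claim_ definition above) =====
theorem generate_distribution_from_freq_dics_spec : Claim_equal_generate_distribution_from_freq_dics := by
  intro fds _ hpre
  unfold Spec_generate_distribution_from_freq_dics
  obtain ⟨hne, hnd⟩ := hpre
  cases fds with
  | nil => exact absurd rfl hne
  | cons d0 rest =>
    unfold generate_distribution_from_freq_dics generate_distribution_from_freq_dics_alt
    simp only [List.headD_cons]
    rw [pv_main_fold (d0 :: rest) d0 _ [] (by simp)]
    have hkeys : (d0.map (·.1)).filter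
        (fun k => (pvCount (d0 :: rest)).getD k 0 == ((d0 :: rest).length : Int))
        = pvKeysF (d0 :: rest) d0 := by
      unfold pvKeysF
      apply List.filter_congr
      intro k _
      rw [Bool.eq_iff_iff, beq_iff_eq, List.all_eq_true, pv_count_eq]
      exact pv_sum_eq_len_iff (d0 :: rest) k hnd
    rw [hkeys, pv_zipWith_map, List.nil_append]
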